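-- pv_equiv track=rewrite | github.com/MLOPEZMALET/Python_Project | Code/ConstructionCorpusTabulaire/Codes/Prefixes_Etiquettes.py | BILOU
-- ===== SOURCE A (Python) =====
-- def ModifieValeurListe(liste, indice, nvValeur):
-- 	nvListe=[]
-- 	for i in range(0, len(liste)):
-- 		if(i==indice):
-- 			nvListe.append(nvValeur)
-- 		else:
-- 			nvListe.append(liste[i])
-- 	return nvListe
--
-- def BILOU(exemple):
-- 	nvEx=[]
-- 	ann_prec=''
-- 	for i in range(0, len(exemple)):
-- 		ligne=exemple[i]
-- 		ann=ligne[len(ligne)-1]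
-- 		ann_suiv=exemple[i+1][len(exemple[i+1])-1] if i < len(exemple)-1 else ''
-- 		if(ann=='Vide'):
-- 			nvEx.append([x for x in ligne])
-- 		else:
-- 			if(not '#' in ann): #ie pas de préfixe
-- 				if (ann_prec=='' or ann_prec=='VIDE'):
-- 					nvEx.append(ModifieValeurListe(ligne, len(ligne)-1, 'B#'+ann))
-- 				else:
-- 					if(ann_prec==ann):
-- 						if(ann==ann_suiv):
-- 							nvEx.append(ModifieValeurListe(ligne, len(ligne)-1, 'I#'+ann))
-- 						else:
-- 							nvEx.append(ModifieValeurListe(ligne, len(ligne)-1, 'L#'+ann))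
-- 					else:
-- 						nvEx.append(ModifieValeurListe(ligne, len(ligne)-1, 'B#'+ann))
-- 			else: #ie BIO ou BILOU
-- 				if('#' in ann_prec):
-- 					if(ann_prec.split('#')[1]!=ann.split('#')[1]): #pas le même thème
-- 						nvEx.append(ModifieValeurListe(ligne, len(ligne)-1, 'B#'+ann.split('#')[1]))
-- 					else:
-- 						if('#' in ann_suiv) :
-- 							if(ann.split('#')[1]==ann_suiv.split('#')[1]):
-- 								nvEx.append(ModifieValeurListe(ligne, len(ligne)-1, 'I#'+ann.split('#')[1]))
-- 							else:
-- 								nvEx.append(ModifieValeurListe(ligne, len(ligne)-1, 'L#'+ann.split('#')[1]))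
-- 						else:
-- 							nvEx.append(ModifieValeurListe(ligne, len(ligne)-1, 'L#'+ann.split('#')[1]))
-- 				else:
-- 					nvEx.append(ModifieValeurListe(ligne, len(ligne)-1, 'B#'+ann.split('#')[1]))
-- 		ann_prec=ann
--
-- 	return nvEx
-- ===== SOURCE B (Python) =====
-- def BILOU(exemple):
--     # Staged run-based rewrite: group the lines into maximal chains under one
--     # symmetric adjacency predicate, then label each chain positionally
--     # (head B, middle I, tail L), copying Vide lines verbatim; unlike A there is
--     # no per-line prev/next branch tree and no carried previous-annotation state.
--     def theme(a):
--         return a.split('#')[1] if '#' in a else a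
--
--     def chain(x, y):
--         # do two adjacent annotations belong to the same chain?
--         if '#' in x:
--             return '#' in y and theme(x) == theme(y)
--         return x == y and x != '' and x != 'VIDE'
--
--     def out_line(l, a, p):
--         return l[:] if a == 'Vide' else l[:-1] + [p + '#' + theme(a)]
--
--     def emit_run(run):
--         out = [out_line(run[0][0], run[0][1], 'B')]
--         m = len(run)
--         for k in range(1, m):
--             out.append(out_line(run[k][0], run[k][1], 'I' if k < m - 1 else 'L'))
--         return out
--
--     pairs = [(l, l[-1]) for l in exemple]
--     runs = []
--     cur = []
--     for pair in pairs:
--         if cur and chain(cur[-1][1], pair[1]):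
--             cur.append(pair)
--         else:
--             if cur:
--                 runs.append(cur)
--             cur = [pair]
--     if cur:
--         runs.append(cur)
--     out = []
--     for run in runs:
--         out += emit_run(run)
--     return out
-- ===== Notes on version B (the rewrite author's own statement) =====
-- stated objective: alternative
-- what changed: A's single stateful index loop (carrying ann_prec through a 13-leaf nested branch tree) is replaced by a staged run-segmentation: one pass groups the lines into maximal chains under a symmetric adjacency predicate, then each chain is labelled purely positionally (head B, middle I, tail L) with no prev/next comparisons at emit time.
-- outside the precondition, e.g. on BILOU([[]]): A raises IndexError, B raises IndexError
import Mathlib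
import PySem

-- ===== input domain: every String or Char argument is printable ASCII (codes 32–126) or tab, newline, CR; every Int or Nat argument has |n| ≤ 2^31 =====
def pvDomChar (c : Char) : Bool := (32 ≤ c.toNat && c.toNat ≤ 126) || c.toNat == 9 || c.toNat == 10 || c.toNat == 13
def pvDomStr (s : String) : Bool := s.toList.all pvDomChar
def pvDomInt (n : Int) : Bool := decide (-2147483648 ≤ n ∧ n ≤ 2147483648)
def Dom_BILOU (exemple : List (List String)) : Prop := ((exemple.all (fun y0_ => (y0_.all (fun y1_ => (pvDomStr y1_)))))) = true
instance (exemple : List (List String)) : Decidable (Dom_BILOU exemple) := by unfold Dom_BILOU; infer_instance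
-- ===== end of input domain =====

-- B replaces A's stateful index loop (carrying ann_prec through a nested branch tree) by a
-- staged run-segmentation: group lines into maximal chains, then label each chain positionally;
-- equivalence of the RETURN value is proved on inputs whose rows are nonempty (A raises
-- IndexError on an empty row).

-- ===== PORT A =====
-- ann.split('#')[1]  (only evaluated under a "'#' in ann" guard, hence total here)
def splitSecond (a : String) : String :=
  PySem.List.pyGetD ((PySem.Str.split? a "#").getD []) 1 ""

def ModifieValeurListe (liste : List String) (indice : Int) (nvValeur : String) : List String :=
  (PySem.List.pyRange 0 (liste.length : Int) 1).foldl
    (fun nvListe i =>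
      if i == indice then nvListe ++ [nvValeur]
      else nvListe ++ [PySem.List.pyGetD liste i ""]) []

def BILOU (exemple : List (List String)) : List (List String) :=
  (((PySem.List.pyRange 0 (exemple.length : Int) 1).foldl
    (fun (st : List (List String) × String) i =>
      let nvEx := st.1
      let ann_prec := st.2
      let ligne := PySem.List.pyGetD exemple i []
      let ann := PySem.List.pyGetD ligne ((ligne.length : Int) - 1) ""
      let ann_suiv :=
        if i < (exemple.length : Int) - 1 then
          let l2 := PySem.List.pyGetD exemple (i + 1) []
          PySem.List.pyGetD l2 ((l2.length : Int) - 1) ""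
        else ""
      let nvEx' :=
        if ann == "Vide" then nvEx ++ [ligne.map (fun x => x)]
        else
          if !(PySem.Str.isIn "#" ann) then
            if ann_prec == "" || ann_prec == "VIDE" then
              nvEx ++ [ModifieValeurListe ligne ((ligne.length : Int) - 1) ("B#" ++ ann)]
            else
              if ann_prec == ann then
                if ann == ann_suiv then
                  nvEx ++ [ModifieValeurListe ligne ((ligne.length : Int) - 1) ("I#" ++ ann)]
                else
                  nvEx ++ [ModifieValeurListe ligne ((ligne.length : Int) - 1) ("L#" ++ ann)]
              else
                nvEx ++ [ModifieValeurListe ligne ((ligne.length : Int) - 1) ("B#" ++ ann)]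
          else
            if PySem.Str.isIn "#" ann_prec then
              if !(splitSecond ann_prec == splitSecond ann) then
                nvEx ++ [ModifieValeurListe ligne ((ligne.length : Int) - 1) ("B#" ++ splitSecond ann)]
              else
                if PySem.Str.isIn "#" ann_suiv then
                  if splitSecond ann == splitSecond ann_suiv then
                    nvEx ++ [ModifieValeurListe ligne ((ligne.length : Int) - 1) ("I#" ++ splitSecond ann)]
                  else
                    nvEx ++ [ModifieValeurListe ligne ((ligne.length : Int) - 1) ("L#" ++ splitSecond ann)]
                else
                  nvEx ++ [ModifieValeurListe ligne ((ligne.length : Int) - 1) ("L#" ++ splitSecond ann)]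
            else
              nvEx ++ [ModifieValeurListe ligne ((ligne.length : Int) - 1) ("B#" ++ splitSecond ann)]
      (nvEx', ann)) ([], "")).1)

-- ===== PORT B =====
-- theme(a) = a.split('#')[1] if '#' in a else a
def bTheme (a : String) : String :=
  if PySem.Str.isIn "#" a then PySem.List.pyGetD ((PySem.Str.split? a "#").getD []) 1 "" else a

-- chain(x, y): do two adjacent annotations belong to the same chain?
def bChain (x y : String) : Bool :=
  if PySem.Str.isIn "#" x then PySem.Str.isIn "#" y && (bTheme x == bTheme y)
  else x == y && !(x == "") && !(x == "VIDE")

-- out_line(l, a, p)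
def outLine (l : List String) (a p : String) : List String :=
  if a == "Vide" then l
  else PySem.List.slice l none (some (-1)) ++ [p ++ "#" ++ bTheme a]

-- emit_run(run): head gets B, then the index loop labels I / L positionally
def emitRun (run : List (List String × String)) : List (List String) :=
  (PySem.List.pyRange 1 (run.length : Int) 1).foldl
    (fun out k =>
      let q := PySem.List.pyGetD run k ([], "")
      out ++ [outLine q.1 q.2 (if k < (run.length : Int) - 1 then "I" else "L")])
    [outLine (PySem.List.pyGetD run 0 ([], "")).1 (PySem.List.pyGetD run 0 ([], "")).2 "B"]

def BILOU_alt (exemple : List (List String)) : List (List String) :=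
  let pairs := exemple.map (fun l => (l, PySem.List.pyGetD l ((l.length : Int) - 1) ""))
  let st := pairs.foldl
    (fun (st : List (List (List String × String)) × List (List String × String)) pair =>
      let runs := st.1
      let cur := st.2
      if !cur.isEmpty && bChain (cur.getLastD ([], "")).2 pair.2 then
        (runs, cur ++ [pair])
      else
        ((if cur.isEmpty then runs else runs ++ [cur]), [pair]))
    ([], [])
  let runs := if st.2.isEmpty then st.1 else st.1 ++ [st.2]
  runs.foldl (fun out run => out ++ emitRun run) []

-- ===== PRECONDITION & SPEC =====
-- Pre_ excludes inputs containing an empty row: there Python A raises IndexError on ligne[len(ligne)-1].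
def Pre_BILOU (exemple : List (List String)) : Prop := ∀ l ∈ exemple, l ≠ []
instance (exemple : List (List String)) : Decidable (Pre_BILOU exemple) := by unfold Pre_BILOU; infer_instance

def pvWitness_BILOU : List (List String) :=
  [["w1", "a"], ["w2", "a"], ["w3", "Vide"], ["w4", "B#th"], ["w5", "I#th"]]

def Spec_BILOU (exemple : List (List String)) (out : List (List String)) : Prop := out = BILOU_alt exemple
instance (exemple : List (List String)) (out : List (List String)) : Decidable (Spec_BILOU exemple out) := by unfold Spec_BILOU; infer_instance

-- ===== CLAIM (what is proved, stated in full; the proofs are below) =====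
def Claim_equal_BILOU : Prop := ∀ (exemple : List (List String)), Dom_BILOU exemple → Pre_BILOU exemple → Spec_BILOU exemple (BILOU exemple)

-- ===== LEMMAS AND PROOFS =====

-- the per-line annotation expression both ports use
def pvLast (l : List String) : String := PySem.List.pyGetD l ((l.length : Int) - 1) ""

-- the cont predicate of the old pointwise analysis: cont(cur, nb)
def bCont (cur nb : String) : Bool :=
  if PySem.Str.isIn "#" cur then PySem.Str.isIn "#" nb && (bTheme nb == bTheme cur)
  else nb == cur && !(cur == "") && !(cur == "VIDE")

-- A's stateful step function, named for the proofs
def stepA (exemple : List (List String)) (st : List (List String) × String) (i : Int) :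
    List (List String) × String :=
  let nvEx := st.1
  let ann_prec := st.2
  let ligne := PySem.List.pyGetD exemple i []
  let ann := PySem.List.pyGetD ligne ((ligne.length : Int) - 1) ""
  let ann_suiv :=
    if i < (exemple.length : Int) - 1 then
      let l2 := PySem.List.pyGetD exemple (i + 1) []
      PySem.List.pyGetD l2 ((l2.length : Int) - 1) ""
    else ""
  let nvEx' :=
    if ann == "Vide" then nvEx ++ [ligne.map (fun x => x)]
    else
      if !(PySem.Str.isIn "#" ann) then
        if ann_prec == "" || ann_prec == "VIDE" then
          nvEx ++ [ModifieValeurListe ligne ((ligne.length : Int) - 1) ("B#" ++ ann)]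
        else
          if ann_prec == ann then
            if ann == ann_suiv then
              nvEx ++ [ModifieValeurListe ligne ((ligne.length : Int) - 1) ("I#" ++ ann)]
            else
              nvEx ++ [ModifieValeurListe ligne ((ligne.length : Int) - 1) ("L#" ++ ann)]
          else
            nvEx ++ [ModifieValeurListe ligne ((ligne.length : Int) - 1) ("B#" ++ ann)]
      else
        if PySem.Str.isIn "#" ann_prec then
          if !(splitSecond ann_prec == splitSecond ann) then
            nvEx ++ [ModifieValeurListe ligne ((ligne.length : Int) - 1) ("B#" ++ splitSecond ann)]
          else
            if PySem.Str.isIn "#" ann_suiv then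
              if splitSecond ann == splitSecond ann_suiv then
                nvEx ++ [ModifieValeurListe ligne ((ligne.length : Int) - 1) ("I#" ++ splitSecond ann)]
              else
                nvEx ++ [ModifieValeurListe ligne ((ligne.length : Int) - 1) ("L#" ++ splitSecond ann)]
            else
              nvEx ++ [ModifieValeurListe ligne ((ligne.length : Int) - 1) ("L#" ++ splitSecond ann)]
        else
          nvEx ++ [ModifieValeurListe ligne ((ligne.length : Int) - 1) ("B#" ++ splitSecond ann)]
  (nvEx', ann)

-- pointwise emission of one non-boundary line from (prev, cur, next) annotations
def emit1 (prec a nxt : String) (l : List String) : List String :=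
  if a == "Vide" then l.map (fun x => x)
  else l.dropLast ++ [(if !(bCont a prec) then "B#" else if bCont a nxt then "I#" else "L#") ++ bTheme a]

-- annotation of the head of a pair list ('' at the end of the input)
def headAnn (t : List (List String × String)) : String := (t.headD ([], "")).2

-- the sequential pointwise pass A's loop amounts to
def Pgo : String → List (List String × String) → List (List String)
  | _, [] => []
  | prec, p :: t => emit1 prec p.2 (headAnn t) p.1 :: Pgo p.2 t

-- maximal chained prefix after a pair q, and the remainder
def splitCont : (List String × String) → List (List String × String) →
    List (List String × String) × List (List String × String)
  | _, [] => ([], [])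
  | q, x :: t => if bChain q.2 x.2 then ((splitCont x t).1.cons x, (splitCont x t).2) else ([], x :: t)

lemma splitCont_len (q : List String × String) (t : List (List String × String)) :
    (splitCont q t).2.length ≤ t.length := by
  induction t generalizing q with
  | nil => simp [splitCont]
  | cons x t ih =>
    simp only [splitCont]
    split
    · exact le_trans (ih x) (by simp)
    · simp

-- the recursive run decomposition the grouping fold computes
def runsRec : List (List String × String) → List (List (List String × String))
  | [] => []
  | p :: t => (p :: (splitCont p t).1) :: runsRec (splitCont p t).2
termination_by l => l.length
decreasing_by
  simp only [List.length_cons]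
  exact Nat.lt_succ_of_le (splitCont_len p t)

-- recursive form of emit_run's tail loop
def emitT : List (List String × String) → List (List String)
  | [] => []
  | [q] => [outLine q.1 q.2 "L"]
  | q :: x :: t => outLine q.1 q.2 "I" :: emitT (x :: t)

-- annotation of the last element of a nonempty run
def lastAnn (run : List (List String × String)) : String := (run.getLastD ([], "")).2

lemma BILOU_eq_foldA (exemple : List (List String)) :
    BILOU exemple = ((PySem.List.pyRange 0 (exemple.length : Int) 1).foldl (stepA exemple) ([], "")).1 := by
  rfl

lemma map_range_getD (l : List String) (m : Nat) (hm : m ≤ l.length) (d : String) :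
    (List.range m).map (fun k => l.getD k d) = l.take m := by
  apply List.ext_getElem
  · simp [Nat.min_eq_left hm]
  · intro i h1 h2
    simp at h1 ⊢
    have : i < l.length := lt_of_lt_of_le h1 hm
    simp [List.getElem?_eq_getElem this]

lemma ModifieValeurListe_eq (ligne : List String) (h : ligne ≠ []) (v : String) :
    ModifieValeurListe ligne ((ligne.length : Int) - 1) v = ligne.dropLast ++ [v] := by
  obtain ⟨m, hm⟩ : ∃ m, ligne.length = m + 1 :=
    ⟨ligne.length - 1, by cases ligne with | nil => exact absurd rfl h | cons a t => simp⟩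
  unfold ModifieValeurListe
  have hbody : (fun (nv : List String) (i : Int) =>
      if i == ((ligne.length : Int) - 1) then nv ++ [v] else nv ++ [PySem.List.pyGetD ligne i ""])
      = fun nv i => nv ++ [if i == ((ligne.length : Int) - 1) then v else PySem.List.pyGetD ligne i ""] := by
    funext nv i; split <;> rfl
  rw [hbody, PySem.List.pyRange_zero_natCast, List.foldl_map,
     show (fun (nv : List String) (k : Nat) => nv ++ [if (k : Int) == ((ligne.length : Int) - 1) then v else PySem.List.pyGetD ligne (k : Int) ""]) = fun nv k => nv ++ [(fun k : Nat => if (k : Int) == ((ligne.length : Int) - 1) then v else PySem.List.pyGetD ligne (k : Int) "") k] from rfl,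
     PySem.List.foldl_append_singleton_eq_map]
  rw [hm, List.range_succ, List.map_append]
  simp only [List.map_cons, List.map_nil, List.nil_append]
  have hcong : ∀ k ∈ List.range m, (if (k : Int) == (((m+1 : Nat) : Int)) - 1 then v else PySem.List.pyGetD ligne (k : Int) "") = ligne.getD k "" := by
    intro k hk
    simp at hk
    have hne : ((k : Int) == (((m+1 : Nat) : Int)) - 1) = false := by
      simp; omega
    rw [hne]
    simp [PySem.List.pyGetD_natCast]
  rw [List.map_congr_left hcong, map_range_getD ligne m (by omega) ""]
  have hl2 : (if ((m : Int) == (((m+1 : Nat) : Int)) - 1) then v else PySem.List.pyGetD ligne (m:Int) "") = v := by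
    simp
  rw [hl2, List.dropLast_eq_take, hm]
  simp

lemma bTheme_chars (a : String) :
    bTheme a = if PySem.Chars.isIn ['#'] a.toList = true then splitSecond a else a := by
  simp [bTheme, splitSecond]

lemma emit_str (a p s : String) :
  (if !(PySem.Str.isIn "#" a) then
     (if p == "" || p == "VIDE" then "B#" ++ a
      else if p == a then (if a == s then "I#" ++ a else "L#" ++ a) else "B#" ++ a)
   else
     (if PySem.Str.isIn "#" p then
        (if !(splitSecond p == splitSecond a) then "B#" ++ splitSecond a
         else if PySem.Str.isIn "#" s then
           (if splitSecond a == splitSecond s then "I#" ++ splitSecond a else "L#" ++ splitSecond a)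
         else "L#" ++ splitSecond a)
      else "B#" ++ splitSecond a))
  = (if !(bCont a p) then "B#" else if bCont a s then "I#" else "L#") ++ bTheme a := by
  by_cases hA : PySem.Chars.isIn ['#'] a.toList = true
  · by_cases hp : PySem.Chars.isIn ['#'] p.toList = true
    · by_cases h1 : splitSecond p = splitSecond a
      · by_cases hs : PySem.Chars.isIn ['#'] s.toList = true
        · by_cases h2 : splitSecond a = splitSecond s
          · simp [bCont, bTheme_chars, hA, hp, hs, h1, h2.symm]
          · simp [bCont, bTheme_chars, hA, hp, hs, h1, Ne.symm h2]
            exact h2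
        · simp [bCont, bTheme_chars, hA, hp, hs, h1]
      · simp [bCont, bTheme_chars, hA, hp, h1]
    · simp [bCont, bTheme_chars, hA, hp]
  · have hth : bTheme a = a := by simp [bTheme_chars, hA]
    rw [hth]
    by_cases hpa : p = a
    · subst hpa
      by_cases h0 : p = ""
      · subst h0; simp [bCont, show PySem.Chars.isIn ['#'] ([] : List Char) = false by decide]
      · by_cases hV : p = "VIDE"
        · subst hV; simp [bCont, show PySem.Chars.isIn ['#'] ['V','I','D','E'] = false by decide]
        · by_cases hps : p = s
          · simp [bCont, hA, h0, hV, hps.symm]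
          · simp [bCont, hA, h0, hV, Ne.symm hps]
            exact hps
    · by_cases h0 : p = ""
      · subst h0; simp [bCont, hA, Ne.symm hpa]
      · by_cases hV : p = "VIDE"
        · subst hV; simp [bCont, hA, hpa]
        · simp [bCont, hA, h0, hV, hpa]

-- one step of A's loop produces exactly the pointwise emission
lemma step_agree (exemple : List (List String)) (hP : Pre_BILOU exemple)
    (k : Nat) (hk : k < exemple.length) (acc : List (List String)) (prec : String) :
    stepA exemple (acc, prec) (k : Int)
      = (acc ++ [emit1 prec (pvLast (exemple.getD k []))
          (if (k : Int) < (exemple.length : Int) - 1 then pvLast (PySem.List.pyGetD exemple ((k : Int) + 1) []) else "")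
          (exemple.getD k [])],
         pvLast (exemple.getD k [])) := by
  have hl : PySem.List.pyGetD exemple (k : Int) [] = exemple.getD k [] :=
    PySem.List.pyGetD_natCast exemple k []
  have hne : exemple.getD k [] ≠ [] := by
    have hmem : exemple.getD k [] ∈ exemple := by
      rw [List.getD_eq_getElem?_getD, List.getElem?_eq_getElem hk]
      exact List.getElem_mem hk
    exact hP _ hmem
  simp only [stepA, hl]
  rw [show (PySem.List.pyGetD (exemple.getD k []) ((((exemple.getD k []).length : Int)) - 1) "") = pvLast (exemple.getD k []) from rfl]
  set L := exemple.getD k [] with hL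
  set a := pvLast L with ha
  set sv := (if (k : Int) < (exemple.length : Int) - 1 then pvLast (PySem.List.pyGetD exemple ((k : Int) + 1) []) else "") with hs
  refine Prod.ext ?_ rfl
  show _ = _
  by_cases hv : (a == "Vide") = true
  · simp only [hv, if_true, emit1]
  · simp only [hv, Bool.false_eq_true, if_false]
    have hsuiv : (if (k : Int) < (exemple.length : Int) - 1 then
        (let l2 := PySem.List.pyGetD exemple ((k : Int) + 1) []
         PySem.List.pyGetD l2 (((l2.length : Int)) - 1) "")
        else "") = sv := by
      rw [hs]; split <;> rfl
    rw [hsuiv]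
    simp only [ModifieValeurListe_eq L hne]
    have E := emit_str a prec sv
    simp only [emit1, hv, Bool.false_eq_true, if_false]
    simp only [← apply_ite (fun v : String => acc ++ [L.dropLast ++ [v]])]
    rw [← E]

lemma beq_swap (x y : String) : (x == y) = (y == x) := by
  by_cases h : x = y
  · subst h; rfl
  · simp [h, Ne.symm h]

lemma isIn_hash_ne (x y : String) (hx : PySem.Chars.isIn ['#'] x.toList = true)
    (hy : PySem.Chars.isIn ['#'] y.toList = false) : (x == y) = false := by
  simp only [beq_eq_false_iff_ne, ne_eq]
  intro h; rw [h] at hx; rw [hx] at hy; exact Bool.true_eq_false.mp hy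

lemma bCont_symm (x y : String) : bCont x y = bCont y x := by
  simp only [bCont, PySem.Str.isIn]
  by_cases hx : PySem.Chars.isIn ['#'] x.toList = true <;>
    by_cases hy : PySem.Chars.isIn ['#'] y.toList = true
  · simp [hx, hy]; exact ⟨Eq.symm, Eq.symm⟩
  · have hy' : PySem.Chars.isIn ['#'] y.toList = false := by simpa using hy
    simp [hx, hy', isIn_hash_ne x y hx hy']
  · have hx' : PySem.Chars.isIn ['#'] x.toList = false := by simpa using hx
    simp [hx', hy, isIn_hash_ne y x hy hx']
  · have hx' : PySem.Chars.isIn ['#'] x.toList = false := by simpa using hx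
    have hy' : PySem.Chars.isIn ['#'] y.toList = false := by simpa using hy
    by_cases h : x = y
    · subst h; simp
    · simp [hx', hy', beq_swap x y, show (y == x) = false by simp [Ne.symm h]]

lemma bChain_eq (x y : String) : bChain x y = bCont x y := by
  simp only [bChain, bCont, PySem.Str.isIn]
  by_cases hx : PySem.Chars.isIn ['#'] x.toList = true
  · simp [hx, beq_swap (bTheme x) (bTheme y)]
  · have hx' : PySem.Chars.isIn ['#'] x.toList = false := by simpa using hx
    simp [hx', beq_swap x y]

lemma bCont_right_empty (a : String) : bCont a "" = false := by
  have hE : PySem.Chars.isIn ['#'] ([] : List Char) = false := by decide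
  simp only [bCont, PySem.Str.isIn]
  by_cases hx : PySem.Chars.isIn ['#'] a.toList = true
  · simp [hx, hE]
  · have hx' : PySem.Chars.isIn ['#'] a.toList = false := by simpa using hx
    by_cases h : a = ""
    · subst h; simp [hE]
    · simp [hx', h, Ne.symm h]

lemma bCont_left_empty (a : String) : bCont "" a = false := by
  have hE : PySem.Chars.isIn ['#'] ([] : List Char) = false := by decide
  simp only [bCont, PySem.Str.isIn]
  simp [hE]


lemma getD_eq_get (exemple : List (List String)) (j : Nat) (hj : j < exemple.length) :
    exemple.getD j [] = exemple[j] := by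
  rw [List.getD_eq_getElem?_getD, List.getElem?_eq_getElem hj]; rfl

lemma pairs_drop_cons (exemple : List (List String)) (j : Nat) (hj : j < exemple.length) :
    (exemple.map (fun l => (l, pvLast l))).drop j
      = (exemple.getD j [], pvLast (exemple.getD j []))
          :: (exemple.map (fun l => (l, pvLast l))).drop (j + 1) := by
  have hj' : j < (exemple.map (fun l => (l, pvLast l))).length := by simpa using hj
  rw [List.drop_eq_getElem_cons hj', List.getElem_map, getD_eq_get exemple j hj]

lemma headAnn_drop (exemple : List (List String)) (j : Nat) :
    headAnn ((exemple.map (fun l => (l, pvLast l))).drop (j + 1))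
      = (if (j : Int) < (exemple.length : Int) - 1
          then pvLast (PySem.List.pyGetD exemple ((j : Int) + 1) []) else "") := by
  by_cases h : j + 1 < exemple.length
  · rw [pairs_drop_cons exemple (j+1) h, if_pos (show (j : Int) < (exemple.length : Int) - 1 by omega)]
    have : ((j : Int) + 1) = (((j + 1 : Nat)) : Int) := by push_cast; ring
    rw [this, PySem.List.pyGetD_natCast]
    rfl
  · have hnil : (exemple.map (fun l => (l, pvLast l))).drop (j + 1) = [] := by
      apply List.drop_eq_nil_of_le; simpa using by omega
    rw [hnil, if_neg (show ¬ (j : Int) < (exemple.length : Int) - 1 by omega)]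
    rfl

lemma seqA (exemple : List (List String)) (hP : Pre_BILOU exemple) :
    ∀ (m j : Nat) (acc : List (List String)) (prec : String), j + m = exemple.length →
    (((List.range' j m).map (fun t : Nat => (t : Int))).foldl (stepA exemple) (acc, prec)).1
      = acc ++ Pgo prec ((exemple.map (fun l => (l, pvLast l))).drop j) := by
  intro m
  induction m with
  | zero =>
    intro j acc prec hj
    have hnil : (exemple.map (fun l => (l, pvLast l))).drop j = [] := by
      apply List.drop_eq_nil_of_le; simp; omega
    simp [hnil, Pgo]
  | succ m ih =>
    intro j acc prec hj
    have hjlt : j < exemple.length := by omega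
    rw [List.range'_succ, List.map_cons, List.foldl_cons,
        step_agree exemple hP j hjlt acc prec,
        ih (j + 1) _ _ (by omega),
        pairs_drop_cons exemple j hjlt]
    rw [Pgo, headAnn_drop exemple j]
    simp

lemma BILOU_eq_Pgo (exemple : List (List String)) (hP : Pre_BILOU exemple) :
    BILOU exemple = Pgo "" (exemple.map (fun l => (l, pvLast l))) := by
  rw [BILOU_eq_foldA, PySem.List.pyRange_zero_natCast, List.range_eq_range']
  simpa using seqA exemple hP exemple.length 0 [] "" (by omega)


-- bridges between the pointwise emission and B's out_line
lemma emit1_B (prec a nxt : String) (l : List String) (h : bCont a prec = false) :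
    emit1 prec a nxt l = outLine l a "B" := by
  simp only [emit1, outLine, h, PySem.List.slice_to_neg_one]
  split
  · simp
  · simp only [Bool.not_false, if_true]
    rw [show ("B" : String) ++ "#" = "B#" from by decide]

lemma emit1_I (prec a nxt : String) (l : List String) (h1 : bCont a prec = true)
    (h2 : bCont a nxt = true) : emit1 prec a nxt l = outLine l a "I" := by
  simp only [emit1, outLine, h1, h2, PySem.List.slice_to_neg_one]
  split
  · simp
  · simp only [Bool.not_true, if_true, if_false, Bool.false_eq_true]
    rw [show ("I" : String) ++ "#" = "I#" from by decide]

lemma emit1_L (prec a nxt : String) (l : List String) (h1 : bCont a prec = true)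
    (h2 : bCont a nxt = false) : emit1 prec a nxt l = outLine l a "L" := by
  simp only [emit1, outLine, h1, h2, PySem.List.slice_to_neg_one]
  split
  · simp
  · simp only [Bool.not_true, if_false, Bool.false_eq_true]
    rw [show ("L" : String) ++ "#" = "L#" from by decide]

lemma lastAnn_cons_cons (q x : List String × String) (r : List (List String × String)) :
    lastAnn (q :: x :: r) = lastAnn (x :: r) := by
  simp [lastAnn, List.getLastD_eq_getLast?]

-- inside a run: the chained tail after a continuing element emits positionally
lemma inRun : ∀ (t : List (List String × String)) (q : List String × String) (prec : String),
    bCont q.2 prec = true →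
    (Pgo prec (q :: t)
        = emitT (q :: (splitCont q t).1) ++ Pgo (lastAnn (q :: (splitCont q t).1)) (splitCont q t).2
      ∧ bCont (headAnn (splitCont q t).2) (lastAnn (q :: (splitCont q t).1)) = false) := by
  intro t
  induction t with
  | nil =>
    intro q prec h1
    refine ⟨?_, ?_⟩
    · simp only [splitCont, Pgo, emitT]
      rw [emit1_L prec q.2 (headAnn []) q.1 h1 (by rw [show headAnn ([] : List (List String × String)) = "" from rfl]; exact bCont_right_empty _)]
      rfl
    · simp only [splitCont]
      rw [show headAnn ([] : List (List String × String)) = "" from rfl]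
      exact bCont_left_empty _
  | cons x t ih =>
    intro q prec h1
    by_cases hb : bChain q.2 x.2 = true
    · have h2 : bCont q.2 x.2 = true := by rw [← bChain_eq]; exact hb
      have hx : bCont x.2 q.2 = true := by rw [bCont_symm]; exact h2
      obtain ⟨ih1, ih2⟩ := ih x q.2 hx
      have hs : splitCont q (x :: t) = (x :: (splitCont x t).1, (splitCont x t).2) := by
        simp [splitCont, hb]
      refine ⟨?_, ?_⟩
      · rw [hs]
        show emit1 prec q.2 (headAnn (x :: t)) q.1 :: Pgo q.2 (x :: t) = _
        rw [show headAnn (x :: t) = x.2 from rfl,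
            emit1_I prec q.2 x.2 q.1 h1 h2, ih1, lastAnn_cons_cons]
        rfl
      · rw [hs]
        simpa [lastAnn_cons_cons] using ih2
    · have hb' : bChain q.2 x.2 = false := by simpa using hb
      have h2 : bCont q.2 x.2 = false := by rw [← bChain_eq]; exact hb'
      have hs : splitCont q (x :: t) = ([], x :: t) := by simp [splitCont, hb']
      refine ⟨?_, ?_⟩
      · rw [hs]
        show emit1 prec q.2 (headAnn (x :: t)) q.1 :: Pgo q.2 (x :: t) = _
        rw [show headAnn (x :: t) = x.2 from rfl, emit1_L prec q.2 x.2 q.1 h1 h2]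
        rfl
      · rw [hs]
        show bCont (headAnn (x :: t)) (lastAnn [q]) = false
        rw [show headAnn (x :: t) = x.2 from rfl, show lastAnn [q] = q.2 from rfl,
            bCont_symm]
        exact h2

-- at the head of a run: a non-continuing element starts a B-labelled run
lemma runHead (t : List (List String × String)) (p : List String × String) (prec : String)
    (h : bCont p.2 prec = false) :
    Pgo prec (p :: t)
        = (outLine p.1 p.2 "B" :: emitT (splitCont p t).1)
            ++ Pgo (lastAnn (p :: (splitCont p t).1)) (splitCont p t).2
      ∧ bCont (headAnn (splitCont p t).2) (lastAnn (p :: (splitCont p t).1)) = false := by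
  cases t with
  | nil =>
    refine ⟨?_, ?_⟩
    · simp only [splitCont, Pgo, emitT]
      rw [emit1_B prec p.2 (headAnn []) p.1 h]
      rfl
    · simp only [splitCont]
      rw [show headAnn ([] : List (List String × String)) = "" from rfl]
      exact bCont_left_empty _
  | cons x t =>
    by_cases hb : bChain p.2 x.2 = true
    · have h2 : bCont x.2 p.2 = true := by rw [bCont_symm, ← bChain_eq]; exact hb
      obtain ⟨ih1, ih2⟩ := inRun t x p.2 h2
      have hs : splitCont p (x :: t) = (x :: (splitCont x t).1, (splitCont x t).2) := by
        simp [splitCont, hb]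
      refine ⟨?_, ?_⟩
      · rw [hs]
        show emit1 prec p.2 (headAnn (x :: t)) p.1 :: Pgo p.2 (x :: t) = _
        rw [show headAnn (x :: t) = x.2 from rfl, emit1_B prec p.2 x.2 p.1 h, ih1,
            lastAnn_cons_cons]
        rfl
      · rw [hs]
        simpa [lastAnn_cons_cons] using ih2
    · have hb' : bChain p.2 x.2 = false := by simpa using hb
      have hs : splitCont p (x :: t) = ([], x :: t) := by simp [splitCont, hb']
      refine ⟨?_, ?_⟩
      · rw [hs]
        show emit1 prec p.2 (headAnn (x :: t)) p.1 :: Pgo p.2 (x :: t) = _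
        rw [show headAnn (x :: t) = x.2 from rfl, emit1_B prec p.2 x.2 p.1 h]
        rfl
      · rw [hs]
        show bCont (headAnn (x :: t)) (lastAnn [p]) = false
        rw [show headAnn (x :: t) = x.2 from rfl, show lastAnn [p] = p.2 from rfl,
            bCont_symm, ← bChain_eq]
        simpa using hb


-- the body of emit_run's index loop, named for the proofs
def stepE (run : List (List String × String)) (out : List (List String)) (k : Int) :
    List (List String) :=
  let q := PySem.List.pyGetD run k ([], "")
  out ++ [outLine q.1 q.2 (if k < (run.length : Int) - 1 then "I" else "L")]

lemma pget (run : List (List String × String)) (j : Nat) (hj : j < run.length) :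
    PySem.List.pyGetD run (j : Int) ([], "") = run[j] := by
  rw [PySem.List.pyGetD_natCast, List.getD_eq_getElem?_getD, List.getElem?_eq_getElem hj]
  rfl

lemma emitIdx (run : List (List String × String)) :
    ∀ (m j : Nat) (acc : List (List String)), 1 ≤ j → j + m = run.length →
    (((List.range' j m).map (fun t : Nat => (t : Int))).foldl (stepE run) acc)
      = acc ++ emitT (run.drop j) := by
  intro m
  induction m with
  | zero =>
    intro j acc h1 hj
    have hnil : run.drop j = [] := by apply List.drop_eq_nil_of_le; omega
    simp [hnil, emitT]
  | succ m ih =>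
    intro j acc h1 hj
    have hjlt : j < run.length := by omega
    have hd : run.drop j = run[j] :: run.drop (j + 1) := List.drop_eq_getElem_cons hjlt
    rw [List.range'_succ, List.map_cons, List.foldl_cons,
        show stepE run acc (j : Int)
          = acc ++ [outLine run[j].1 run[j].2 (if (j : Int) < (run.length : Int) - 1 then "I" else "L")] by
            simp [stepE, pget run j hjlt],
        ih (j + 1) _ (by omega) (by omega), hd]
    rcases Nat.eq_zero_or_pos m with hm | hm
    · have hd2 : run.drop (j + 1) = [] := by apply List.drop_eq_nil_of_le; omega
      rw [hd2, if_neg (show ¬ (j : Int) < (run.length : Int) - 1 by omega)]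
      simp [emitT]
    · have hlt2 : j + 1 < run.length := by omega
      have hd2 : run.drop (j + 1) = run[j + 1] :: run.drop (j + 2) :=
        List.drop_eq_getElem_cons hlt2
      rw [hd2, if_pos (show (j : Int) < (run.length : Int) - 1 by omega)]
      simp [emitT]

lemma emitRun_eq (p : List String × String) (r : List (List String × String)) :
    emitRun (p :: r) = outLine p.1 p.2 "B" :: emitT r := by
  have hrange : PySem.List.pyRange 1 (((p :: r).length : Int)) 1
      = (List.range' 1 r.length).map (fun t : Nat => (t : Int)) := by
    rw [PySem.List.pyRange_one, List.range'_eq_map_range, List.map_map]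
    have : ((((p :: r).length : Int)) - 1).toNat = r.length := by simp
    rw [this]
    apply List.map_congr_left
    intro k _
    simp
  have h0 : PySem.List.pyGetD (p :: r) 0 ([], "") = p := by
    exact pget (p :: r) 0 (by simp)
  show (PySem.List.pyRange 1 (((p :: r).length : Int)) 1).foldl (stepE (p :: r))
      [outLine (PySem.List.pyGetD (p :: r) 0 ([], "")).1 (PySem.List.pyGetD (p :: r) 0 ([], "")).2 "B"] = _
  rw [hrange, emitIdx (p :: r) r.length 1 _ (by omega) (by rw [List.length_cons]; omega), h0,
      show (p :: r).drop 1 = r from rfl]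
  rfl

-- the body of the grouping fold, named for the proofs
def stepG (st : List (List (List String × String)) × List (List String × String))
    (pair : List String × String) :
    List (List (List String × String)) × List (List String × String) :=
  let runs := st.1
  let cur := st.2
  if !cur.isEmpty && bChain (cur.getLastD ([], "")).2 pair.2 then
    (runs, cur ++ [pair])
  else
    ((if cur.isEmpty then runs else runs ++ [cur]), [pair])

-- finishing step of the grouping pass
def finishG (st : List (List (List String × String)) × List (List String × String)) :
    List (List (List String × String)) :=
  if st.2.isEmpty then st.1 else st.1 ++ [st.2]

lemma groupLoop : ∀ (l : List (List String × String)) (runs : List (List (List String × String)))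
    (cur : List (List String × String)) (q : List String × String),
    cur ≠ [] → cur.getLastD ([], "") = q →
    finishG (l.foldl stepG (runs, cur))
      = runs ++ (cur ++ (splitCont q l).1) :: runsRec (splitCont q l).2 := by
  intro l
  induction l with
  | nil =>
    intro runs cur q hne _
    simp only [List.foldl_nil, splitCont, runsRec, finishG]
    rw [if_neg (by simpa [List.isEmpty_iff] using hne)]
    simp
  | cons x l ih =>
    intro runs cur q hne hq
    have he : cur.isEmpty = false := by simpa [List.isEmpty_iff] using hne
    by_cases hb : bChain q.2 x.2 = true
    · have hstep : stepG (runs, cur) x = (runs, cur ++ [x]) := by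
        simp only [stepG, he, hq]
        simp [hb]
      rw [List.foldl_cons, hstep,
          ih runs (cur ++ [x]) x (by simp) (by simp)]
      simp [splitCont, hb]
    · have hb' : bChain q.2 x.2 = false := by simpa using hb
      have hstep : stepG (runs, cur) x = (runs ++ [cur], [x]) := by
        simp only [stepG, he, hq]
        simp [hb']
      rw [List.foldl_cons, hstep, ih (runs ++ [cur]) [x] x (by simp) rfl]
      simp only [splitCont, hb', Bool.false_eq_true, if_false]
      rw [runsRec]
      simp

lemma runs_eq (pairs : List (List String × String)) :
    finishG (pairs.foldl stepG ([], [])) = runsRec pairs := by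
  cases pairs with
  | nil => simp [finishG, runsRec]
  | cons p t =>
    have h0 : stepG ([], []) p = ([], [p]) := by simp [stepG]
    rw [List.foldl_cons, h0, groupLoop t [] [p] p (by simp) rfl, runsRec]
    simp

lemma Pgo_flat : ∀ (n : Nat) (pairs : List (List String × String)) (prec : String),
    pairs.length ≤ n → bCont (headAnn pairs) prec = false →
    Pgo prec pairs = (runsRec pairs).flatMap emitRun := by
  intro n
  induction n with
  | zero =>
    intro pairs prec hn _
    have : pairs = [] := List.length_eq_zero_iff.mp (by omega)
    subst this
    simp [Pgo, runsRec]
  | succ n ih =>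
    intro pairs prec hn hc
    cases pairs with
    | nil => simp [Pgo, runsRec]
    | cons p t =>
      have h : bCont p.2 prec = false := hc
      obtain ⟨e1, e2⟩ := runHead t p prec h
      rw [e1, runsRec, List.flatMap_cons, emitRun_eq,
          ih (splitCont p t).2 _ (by have := splitCont_len p t; simp at hn; omega) e2]

-- ===== VERDICT (by name: the statement is the Claim_ definition above) =====
theorem BILOU_spec : Claim_equal_BILOU := by
  intro exemple _hD hP
  unfold Spec_BILOU
  rw [BILOU_eq_Pgo exemple hP]
  have hB : BILOU_alt exemple
      = (runsRec (exemple.map (fun l => (l, pvLast l)))).foldl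
          (fun out run => out ++ emitRun run) [] := by
    show (finishG ((exemple.map (fun l => (l, pvLast l))).foldl stepG ([], []))).foldl
            (fun out run => out ++ emitRun run) [] = _
    rw [runs_eq]
  rw [hB, PySem.List.foldl_append_eq_flatMap]
  simpa using Pgo_flat (exemple.map (fun l => (l, pvLast l))).length
    (exemple.map (fun l => (l, pvLast l))) "" le_rfl (bCont_right_empty _)
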